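-- pv_equiv track=rewrite | github.com/raeez/chiral-bar-cobar | compute/lib/genus4_stable_graph_enumeration.py | _automorphism_order
-- ===== SOURCE A (Python) =====
-- from itertools import permutations, product as cartprod
-- from math import factorial
-- from typing import Dict, List, Tuple
--
-- def _genus_preserving_perms(genera: Tuple[int, ...]):
--     """All vertex permutations preserving the genus labeling."""
--     num_v = len(genera)
--     by_genus: Dict[int, List[int]] = {}
--     for v, g in enumerate(genera):
--         by_genus.setdefault(g, []).append(v)
--
--     genus_keys = sorted(by_genus.keys())
--     group_data = [
--         (by_genus[gk], list(permutations(by_genus[gk])))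
--         for gk in genus_keys
--     ]
--     perm_lists = [gd[1] for gd in group_data]
--     vert_lists = [gd[0] for gd in group_data]
--
--     for combo in cartprod(*perm_lists):
--         perm = list(range(num_v))
--         for verts, mapping in zip(vert_lists, combo):
--             for old_v, new_v in zip(verts, mapping):
--                 perm[old_v] = new_v
--         yield tuple(perm)
--
-- def _automorphism_order(adj: Tuple[Tuple[int, ...], ...],
--                         genera: Tuple[int, ...]) -> int:
--     """Count automorphisms of (adj, genera).
--
--     Vertex permutations preserving genera and adjacency, times
--     edge-level factors (self-loop flips + parallel edge permutations).
--     """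
--     num_v = len(adj)
--     count = 0
--
--     for perm in _genus_preserving_perms(genera):
--         inv = [0] * num_v
--         for old, new in enumerate(perm):
--             inv[new] = old
--
--         preserves = True
--         for a in range(num_v):
--             for b in range(a, num_v):
--                 if adj[inv[a]][inv[b]] != adj[a][b]:
--                     preserves = False
--                     break
--             if not preserves:
--                 break
--         if not preserves:
--             continue
--
--         edge_factor = 1
--         for i in range(num_v):
--             k = adj[i][i]
--             edge_factor *= factorial(k) * (2 ** k)
--         for i in range(num_v):
--             for j in range(i + 1, num_v):
--                 edge_factor *= factorial(adj[i][j])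
--         count += edge_factor
--
--     return count
-- ===== SOURCE B (Python) =====
-- from itertools import permutations
-- from math import factorial
--
-- def _automorphism_order(adj, genera):
--     """Count automorphisms of (adj, genera).
--
--     The edge factor depends only on adj, so compute it once; separately
--     count the vertex permutations preserving genera and adjacency by
--     filtering all permutations of range(n).
--     """
--     n = len(adj)
--     edge_factor = 1
--     for i in range(n):
--         k = adj[i][i]
--         edge_factor *= factorial(k) * 2 ** k
--         for j in range(i + 1, n):
--             edge_factor *= factorial(adj[i][j])
--     count = sum(
--         1 for q in permutations(range(n))
--         if all(genera[q[v]] == genera[v] for v in range(n))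
--         and all(adj[q[a]][q[b]] == adj[a][b]
--                 for a in range(n) for b in range(a, n))
--     )
--     return count * edge_factor
-- ===== Notes on version B (the rewrite author's own statement) =====
-- stated objective: simpler
-- what changed: B computes the permutation-independent edge factor once in a single nested pass and separately counts the genus- and adjacency-preserving permutations by filtering all permutations of range(n), replacing A's per-genus-group cartesian-product generator, inverse-array assembly and per-permutation edge-factor recomputation; the two counts agree because inversion is a bijection of the genus-preserving permutations.
-- outside the precondition, e.g. on _automorphism_order(((0, 0), (0, 0)), (0,)): A returns 1, B raises IndexError
import Mathlib
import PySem

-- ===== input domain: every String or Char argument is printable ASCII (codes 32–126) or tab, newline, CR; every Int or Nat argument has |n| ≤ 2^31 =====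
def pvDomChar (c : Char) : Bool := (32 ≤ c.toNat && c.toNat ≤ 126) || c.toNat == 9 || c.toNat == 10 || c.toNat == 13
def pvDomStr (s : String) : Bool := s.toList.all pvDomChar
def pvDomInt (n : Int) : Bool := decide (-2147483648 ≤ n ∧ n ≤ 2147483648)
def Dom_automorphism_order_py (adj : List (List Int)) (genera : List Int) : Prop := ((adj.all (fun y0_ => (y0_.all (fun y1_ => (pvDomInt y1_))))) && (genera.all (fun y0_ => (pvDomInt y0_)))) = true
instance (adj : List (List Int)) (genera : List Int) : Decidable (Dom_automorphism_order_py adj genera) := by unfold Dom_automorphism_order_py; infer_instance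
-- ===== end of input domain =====

-- B hoists the permutation-independent edge factor out of the loop and counts the
-- genus/adjacency-preserving permutations by filtering all permutations of range(n)
-- instead of assembling them group-by-group (objective: simpler; no speed claim).

-- ===== PORT A =====
-- helpers shared by both ports where the two Pythons contain the same subexpression:
-- math.factorial, the adj[a][b] lookup and the upper-triangle adjacency check.
def pvFact (k : Int) : Int := (Nat.factorial k.toNat : Int)  -- math.factorial, exact for k ≥ 0 (Pre_)

def pvAdjAt (adj : List (List Int)) (a b : Nat) : Int := (adj.getD a []).getD b 0  -- adj[a][b], in range under Pre_

-- the 'preserves' double loop with break: adj[q[a]][q[b]] == adj[a][b] for a ≤ b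
def pvTriangle (adj : List (List Int)) (numv : Nat) (q : List Nat) : Bool :=
  (List.range numv).all fun a => (List.range' a (numv - a)).all fun b =>
    pvAdjAt adj (q.getD a 0) (q.getD b 0) == pvAdjAt adj a b

-- by_genus.setdefault(g, []).append(v) over enumerate(genera)
def pvByGenus (genera : List Int) : PySem.Dict Int (List Nat) :=
  genera.zipIdx.foldl (fun d p => d.modify p.1 [] (fun x => x ++ [p.2])) PySem.Dict.empty

-- perm = list(range(num_v)); for verts, mapping in zip(...): for old, new in zip(...): perm[old] = new
def pvAssemble (numv : Nat) (pairs : List (List Nat × List Nat)) : List Nat :=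
  pairs.foldl (fun perm vm => (vm.1.zip vm.2).foldl (fun p on => p.set on.1 on.2) perm)
    (List.range numv)

-- _genus_preserving_perms (as the list of yielded tuples; itertools.permutations and
-- itertools.product are ported as List.permutations / List.sections, order irrelevant here)
def pvGPP (genera : List Int) : List (List Nat) :=
  let numv := genera.length
  let d := pvByGenus genera
  let ks := PySem.List.sorted d.keys (fun x => x) false
  let vert_lists := ks.map (fun gk => d.getD gk [])
  let perm_lists := vert_lists.map List.permutations
  perm_lists.sections.map (fun combo => pvAssemble numv (vert_lists.zip combo))

-- inv = [0]*num_v; for old, new in enumerate(perm): inv[new] = old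
def pvInv (numv : Nat) (perm : List Nat) : List Nat :=
  perm.zipIdx.foldl (fun inv p => inv.set p.1 p.2) (List.replicate numv 0)

-- the two edge_factor passes of A
def pvEdgeFactor (adj : List (List Int)) (numv : Nat) : Int :=
  let e1 := (List.range numv).foldl
    (fun e i => e * (pvFact (pvAdjAt adj i i) * 2 ^ (pvAdjAt adj i i).toNat)) 1
  (List.range numv).foldl
    (fun e i => (List.range' (i+1) (numv - (i+1))).foldl
      (fun e j => e * pvFact (pvAdjAt adj i j)) e) e1

def automorphism_order_py (adj : List (List Int)) (genera : List Int) : Int :=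
  let numv := adj.length
  (pvGPP genera).foldl
    (fun count perm =>
      if pvTriangle adj numv (pvInv numv perm) then count + pvEdgeFactor adj numv else count) 0

-- ===== PORT B =====
-- all(genera[q[v]] == genera[v] for v in range(n))
def pvGenusOK (genera : List Int) (n : Nat) (q : List Nat) : Bool :=
  (List.range n).all fun v => genera.getD (q.getD v 0) 0 == genera.getD v 0

def automorphism_order_py_alt (adj : List (List Int)) (genera : List Int) : Int :=
  let n := adj.length
  let ef := (List.range n).foldl
    (fun e i => (List.range' (i+1) (n - (i+1))).foldl
      (fun e j => e * pvFact (pvAdjAt adj i j))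
      (e * (pvFact (pvAdjAt adj i i) * 2 ^ (pvAdjAt adj i i).toNat))) 1
  (((List.range n).permutations.countP
      (fun q => pvGenusOK genera n q && pvTriangle adj n q) : Int)) * ef

-- ===== PRECONDITION & SPEC =====
-- Pre_ excludes inputs where A raises (rows shorter than len(adj): IndexError; negative
-- diagonal/upper entries: ValueError from factorial) and inputs with len(genera) ≠ len(adj),
-- where A's value (when it returns at all) is read off leftover zeros of inv — accidental.
def Pre_automorphism_order_py (adj : List (List Int)) (genera : List Int) : Prop :=
  genera.length = adj.length ∧ (∀ row ∈ adj, adj.length ≤ row.length) ∧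
    ∀ i < adj.length, ∀ j < adj.length, i ≤ j → 0 ≤ pvAdjAt adj i j

instance (adj : List (List Int)) (genera : List Int) : Decidable (Pre_automorphism_order_py adj genera) := by
  unfold Pre_automorphism_order_py; infer_instance

def pvWitness_automorphism_order_py : List (List Int) × List Int := ([[0, 1], [1, 0]], [0, 0])

def Spec_automorphism_order_py (adj : List (List Int)) (genera : List Int) (out : Int) : Prop := out = automorphism_order_py_alt adj genera
instance (adj : List (List Int)) (genera : List Int) (out : Int) : Decidable (Spec_automorphism_order_py adj genera out) := by unfold Spec_automorphism_order_py; infer_instance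

-- ===== CLAIM (what is proved, stated in full; the proofs are below) =====
def Claim_equal_automorphism_order_py : Prop := ∀ (adj : List (List Int)) (genera : List Int), Dom_automorphism_order_py adj genera → Pre_automorphism_order_py adj genera → Spec_automorphism_order_py adj genera (automorphism_order_py adj genera)

-- ===== LEMMAS AND PROOFS =====

-- ---- generic: a fold of list.set updates ----
def pvSetFold (u : List (Nat × Nat)) (init : List Nat) : List Nat :=
  u.foldl (fun p kv => p.set kv.1 kv.2) init

theorem pvSetFold_length (u : List (Nat × Nat)) (init : List Nat) :
    (pvSetFold u init).length = init.length := by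
  induction u generalizing init with
  | nil => rfl
  | cons kv rest ih => simpa [pvSetFold, List.foldl_cons] using ih (init.set kv.1 kv.2)

theorem pvSetFold_getD_not_mem (u : List (Nat × Nat)) (init : List Nat) (v : Nat)
    (h : v ∉ u.map Prod.fst) :
    (pvSetFold u init).getD v 0 = init.getD v 0 := by
  induction u generalizing init with
  | nil => rfl
  | cons kv rest ih =>
    simp only [List.map_cons, List.mem_cons, not_or] at h
    rw [pvSetFold, List.foldl_cons, ← pvSetFold, ih _ h.2,
      List.getD_eq_getElem?_getD, List.getD_eq_getElem?_getD,
      List.getElem?_set_ne (Ne.symm h.1)]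

theorem pvSetFold_getD_mem (u : List (Nat × Nat)) (init : List Nat) (v w : Nat)
    (hnd : (u.map Prod.fst).Nodup) (hm : (v, w) ∈ u) (hv : v < init.length) :
    (pvSetFold u init).getD v 0 = w := by
  induction u generalizing init with
  | nil => cases hm
  | cons kv rest ih =>
    simp only [List.map_cons, List.nodup_cons] at hnd
    rw [pvSetFold, List.foldl_cons, ← pvSetFold]
    rcases List.mem_cons.mp hm with he | hm'
    · rw [← he] at hnd ⊢
      rw [pvSetFold_getD_not_mem _ _ _ hnd.1,
        List.getD_eq_getElem?_getD, List.getElem?_set_self hv]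
      rfl
    · exact ih _ hnd.2 hm' (by simpa using hv)

theorem foldl_foldl_eq_flatMap (pairs : List (List Nat × List Nat)) (init : List Nat) :
    pairs.foldl (fun perm vm => (vm.1.zip vm.2).foldl (fun p on => p.set on.1 on.2) perm) init
      = pvSetFold (pairs.flatMap fun vm => vm.1.zip vm.2) init := by
  induction pairs generalizing init with
  | nil => rfl
  | cons vm rest ih =>
    rw [List.foldl_cons, ih, List.flatMap_cons]
    show _ = List.foldl _ _ (_ ++ _)
    rw [List.foldl_append]
    rfl

theorem pvAssemble_eq_setFold (numv : Nat) (pairs : List (List Nat × List Nat)) :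
    pvAssemble numv pairs = pvSetFold (pairs.flatMap fun vm => vm.1.zip vm.2) (List.range numv) :=
  foldl_foldl_eq_flatMap pairs (List.range numv)

-- ---- the genus groups ----

-- getD of the grouping dict
theorem pvByGenus_getD (genera : List Int) (g : Int) :
    (pvByGenus genera).getD g [] = (genera.zipIdx.filter (fun p => p.1 == g)).map (·.2) := by
  simpa [PySem.Dict.getD_empty] using
    PySem.Dict.getD_foldl_modify_append genera.zipIdx (PySem.Dict.empty (κ := Int) (ν := List Nat)) g

theorem mem_pvByGenus_getD (genera : List Int) (g : Int) (v : Nat) :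
    v ∈ (pvByGenus genera).getD g [] ↔ v < genera.length ∧ genera.getD v 0 = g := by
  rw [pvByGenus_getD]
  simp only [List.mem_map, List.mem_filter, beq_iff_eq]
  constructor
  · rintro ⟨⟨gv, w⟩, ⟨hmem, hg⟩, hv⟩
    cases hv
    have h := List.mem_zipIdx_iff_getElem?.mp hmem
    simp only at h
    have hlt : w < genera.length := by
      rcases List.getElem?_eq_some_iff.mp h with ⟨hw, -⟩
      exact hw
    refine ⟨hlt, ?_⟩
    rw [List.getD_eq_getElem?_getD, h]
    exact hg
  · rintro ⟨hv, hg⟩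
    refine ⟨(g, v), ⟨List.mem_zipIdx_iff_getElem?.mpr ?_, rfl⟩, rfl⟩
    simp only
    rw [List.getElem?_eq_getElem hv, ← hg, List.getD_eq_getElem _ _ hv]

theorem nodup_pvByGenus_getD (genera : List Int) (g : Int) :
    ((pvByGenus genera).getD g []).Nodup := by
  rw [pvByGenus_getD]
  have hsub : ((genera.zipIdx.filter (fun p => p.1 == g)).map (·.2)).Sublist
      (genera.zipIdx.map (·.2)) := List.Sublist.map _ (List.filter_sublist ..)
  have : (genera.zipIdx.map (·.2)).Nodup := by
    have := List.zipIdx_map_snd 0 genera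
    simp only [show (fun (x : Int × Nat) => x.2) = Prod.snd from rfl, this]
    exact List.nodup_range'
  exact this.sublist hsub

theorem keys_pvByGenus (genera : List Int) :
    (pvByGenus genera).keys = PySem.Set.ofList genera := by
  have h := PySem.Dict.keys_foldl_modify_key genera.zipIdx (fun p => p.1) []
    (fun _ p => fun x => x ++ [p.2]) PySem.Dict.empty
  rw [pvByGenus, h]
  rw [show (PySem.Dict.empty (κ := Int) (ν := List Nat)).keys = PySem.Set.empty from rfl,
    PySem.Set.update_empty,
    show List.map (fun (p : Int × Nat) => p.1) genera.zipIdx = List.map Prod.fst genera.zipIdx from rfl,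
    List.zipIdx_map_fst]

def pvKs (genera : List Int) : List Int :=
  PySem.List.sorted (pvByGenus genera).keys (fun x => x) false

def pvGroups (genera : List Int) : List (List Nat) :=
  (pvKs genera).map (fun gk => (pvByGenus genera).getD gk [])

theorem pvGPP_eq (genera : List Int) :
    pvGPP genera = ((pvGroups genera).map List.permutations).sections.map
      (fun combo => pvAssemble genera.length ((pvGroups genera).zip combo)) := rfl

theorem pvKs_perm (genera : List Int) : (pvKs genera).Perm (PySem.Set.ofList genera) := by
  rw [pvKs, ← keys_pvByGenus]
  exact PySem.List.sorted_perm _ _ _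

theorem nodup_pvKs (genera : List Int) : (pvKs genera).Nodup :=
  (pvKs_perm genera).nodup_iff.mpr (PySem.Set.nodup_ofList genera)

theorem mem_pvKs (genera : List Int) (g : Int) : g ∈ pvKs genera ↔ g ∈ genera := by
  rw [(pvKs_perm genera).mem_iff, PySem.Set.mem_ofList]

theorem pvGroups_char (genera : List Int) (G : List Nat) (hG : G ∈ pvGroups genera) :
    ∃ g, ∀ v, v ∈ G ↔ v < genera.length ∧ genera.getD v 0 = g := by
  rcases List.mem_map.mp hG with ⟨g, -, hGe⟩
  exact ⟨g, fun v => hGe ▸ mem_pvByGenus_getD genera g v⟩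

theorem pvGroups_nodup (genera : List Int) (G : List Nat) (hG : G ∈ pvGroups genera) :
    G.Nodup := by
  rcases List.mem_map.mp hG with ⟨g, -, hGe⟩
  exact hGe ▸ nodup_pvByGenus_getD genera g

theorem nodup_flatten_pvGroups (genera : List Int) : (pvGroups genera).flatten.Nodup := by
  rw [List.nodup_flatten]
  refine ⟨fun G hG => pvGroups_nodup genera G hG, ?_⟩
  refine List.Pairwise.map _ (fun g g' hne => ?_) (nodup_pvKs genera)
  intro v hv hv'
  rw [mem_pvByGenus_getD] at hv hv'
  exact hne (hv.2 ▸ hv'.2)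

theorem mem_flatten_pvGroups (genera : List Int) (v : Nat) :
    v ∈ (pvGroups genera).flatten ↔ v < genera.length := by
  rw [List.mem_flatten]
  constructor
  · rintro ⟨G, hG, hv⟩
    rcases pvGroups_char genera G hG with ⟨g, hchar⟩
    exact ((hchar v).mp hv).1
  · intro hv
    refine ⟨(pvByGenus genera).getD (genera.getD v 0) [], ?_, ?_⟩
    · refine List.mem_map_of_mem ((mem_pvKs genera _).mpr ?_)
      rw [List.getD_eq_getElem _ _ hv]
      exact List.getElem_mem hv
    · exact (mem_pvByGenus_getD genera _ v).mpr ⟨hv, rfl⟩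

-- ---- the assembled permutation ----

def pvUpd (Gs combo : List (List Nat)) : List (Nat × Nat) :=
  (Gs.zip combo).flatMap (fun vm => vm.1.zip vm.2)

theorem pvUpd_map_fst (Gs combo : List (List Nat))
    (hF : List.Forall₂ (fun c G => c.Perm G) combo Gs) :
    (pvUpd Gs combo).map Prod.fst = Gs.flatten := by
  induction hF with
  | nil => rfl
  | cons h hF ih =>
    rename_i c G combo' Gs'
    show ((G.zip c ++ pvUpd Gs' combo').map Prod.fst) = G ++ Gs'.flatten
    rw [List.map_append, ih, List.map_fst_zip (le_of_eq h.length_eq.symm)]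

theorem pvUpd_map_snd (Gs combo : List (List Nat))
    (hF : List.Forall₂ (fun c G => c.Perm G) combo Gs) :
    (pvUpd Gs combo).map Prod.snd = combo.flatten := by
  induction hF with
  | nil => rfl
  | cons h hF ih =>
    rename_i c G combo' Gs'
    show ((G.zip c ++ pvUpd Gs' combo').map Prod.snd) = c ++ combo'.flatten
    rw [List.map_append, ih, List.map_snd_zip (le_of_eq h.length_eq)]

theorem flatten_perm_of_forall₂ (Gs combo : List (List Nat))
    (hF : List.Forall₂ (fun c G => c.Perm G) combo Gs) :
    combo.flatten.Perm Gs.flatten := by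
  induction hF with
  | nil => rfl
  | cons h hF ih => exact h.append ih

theorem pvUpd_sound (Gs combo : List (List Nat))
    (hF : List.Forall₂ (fun c G => c.Perm G) combo Gs) (v w : Nat)
    (hm : (v, w) ∈ pvUpd Gs combo) : ∃ G ∈ Gs, v ∈ G ∧ w ∈ G := by
  induction hF with
  | nil => cases hm
  | cons h hF ih =>
    rename_i c G combo' Gs'
    rcases List.mem_append.mp hm with hz | hrest
    · rcases List.of_mem_zip hz with ⟨hvG, hwc⟩
      exact ⟨G, List.mem_cons_self, hvG, h.subset hwc⟩
    · rcases ih hrest with ⟨G', hG', hv', hw'⟩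
      exact ⟨G', List.mem_cons_of_mem _ hG', hv', hw'⟩

theorem pvUpd_cover (Gs combo : List (List Nat))
    (hF : List.Forall₂ (fun c G => c.Perm G) combo Gs) (G : List Nat) (v : Nat)
    (hG : G ∈ Gs) (hv : v ∈ G) : ∃ w ∈ G, (v, w) ∈ pvUpd Gs combo := by
  induction hF with
  | nil => cases hG
  | cons h hF ih =>
    rename_i c G₀ combo' Gs'
    have hupd : pvUpd (G₀ :: Gs') (c :: combo') = G₀.zip c ++ pvUpd Gs' combo' := rfl
    rw [hupd]
    rcases List.mem_cons.mp hG with he | hG'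
    · subst he
      rcases List.mem_iff_getElem.mp hv with ⟨j, hj, hGj⟩
      have hjc : j < c.length := h.length_eq.symm ▸ hj
      have hjz : j < (G.zip c).length := by rw [List.length_zip]; omega
      refine ⟨c.get ⟨j, hjc⟩, h.subset (List.getElem_mem hjc), ?_⟩
      refine List.mem_append.mpr (Or.inl (List.mem_iff_getElem.mpr ⟨j, hjz, ?_⟩))
      rw [List.getElem_zip, hGj]
      rfl
    · rcases ih hG' with ⟨w, hw, hmem⟩
      exact ⟨w, hw, List.mem_append.mpr (Or.inr hmem)⟩

-- value of the assembled permutation on any recorded pair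
theorem pvAssemble_getD (genera : List Int) (combo : List (List Nat))
    (hF : List.Forall₂ (fun c G => c.Perm G) combo (pvGroups genera)) (v w : Nat)
    (hm : (v, w) ∈ pvUpd (pvGroups genera) combo) :
    (pvAssemble genera.length ((pvGroups genera).zip combo)).getD v 0 = w := by
  rw [pvAssemble_eq_setFold]
  refine pvSetFold_getD_mem _ _ v w ?_ hm ?_
  · rw [show (((pvGroups genera).zip combo).flatMap fun vm => vm.1.zip vm.2)
        = pvUpd (pvGroups genera) combo from rfl,
      pvUpd_map_fst _ _ hF]
    exact nodup_flatten_pvGroups genera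
  · rcases pvUpd_sound _ _ hF v w hm with ⟨G, hG, hvG, -⟩
    rw [List.length_range]
    exact (mem_flatten_pvGroups genera v).mp (List.mem_flatten.mpr ⟨G, hG, hvG⟩)

theorem pvAssemble_length (genera : List Int) (combo : List (List Nat)) :
    (pvAssemble genera.length ((pvGroups genera).zip combo)).length = genera.length := by
  rw [pvAssemble_eq_setFold, pvSetFold_length, List.length_range]

theorem pvAssemble_spec (genera : List Int) (combo : List (List Nat))
    (hF : List.Forall₂ (fun c G => c.Perm G) combo (pvGroups genera)) (v : Nat)
    (hv : v < genera.length) :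
    ∃ w, w < genera.length ∧ genera.getD w 0 = genera.getD v 0 ∧
      (v, w) ∈ pvUpd (pvGroups genera) combo ∧
      (pvAssemble genera.length ((pvGroups genera).zip combo)).getD v 0 = w := by
  rcases List.mem_flatten.mp ((mem_flatten_pvGroups genera v).mpr hv) with ⟨G, hG, hvG⟩
  rcases pvUpd_cover _ _ hF G v hG hvG with ⟨w, hwG, hmem⟩
  rcases pvGroups_char genera G hG with ⟨g, hchar⟩
  refine ⟨w, ?_, ?_, hmem, pvAssemble_getD genera combo hF v w hmem⟩
  · exact (mem_flatten_pvGroups genera w).mp (List.mem_flatten.mpr ⟨G, hG, hwG⟩)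
  · rw [((hchar w).mp hwG).2, ((hchar v).mp hvG).2]

theorem pvUpd_snd_nodup (genera : List Int) (combo : List (List Nat))
    (hF : List.Forall₂ (fun c G => c.Perm G) combo (pvGroups genera)) :
    ((pvUpd (pvGroups genera) combo).map Prod.snd).Nodup := by
  rw [pvUpd_map_snd _ _ hF]
  exact (flatten_perm_of_forall₂ _ _ hF).nodup_iff.mpr (nodup_flatten_pvGroups genera)

theorem pvAssemble_perm (genera : List Int) (combo : List (List Nat))
    (hF : List.Forall₂ (fun c G => c.Perm G) combo (pvGroups genera)) :
    (pvAssemble genera.length ((pvGroups genera).zip combo)).Perm (List.range genera.length) := by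
  have hlen := pvAssemble_length genera combo
  have hinj := List.inj_on_of_nodup_map (pvUpd_snd_nodup genera combo hF)
  have hnd : (pvAssemble genera.length ((pvGroups genera).zip combo)).Nodup := by
    show List.Pairwise _ _
    refine List.pairwise_iff_getElem.mpr ?_
    intro i j hi hj hij heq
    rcases pvAssemble_spec genera combo hF i (hlen ▸ hi) with ⟨w, -, -, hmi, hgi⟩
    rcases pvAssemble_spec genera combo hF j (hlen ▸ hj) with ⟨w', -, -, hmj, hgj⟩
    rw [List.getD_eq_getElem _ _ hi] at hgi
    rw [List.getD_eq_getElem _ _ hj] at hgj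
    have hww : w = w' := by rw [← hgi, ← hgj, heq]
    subst hww
    have := hinj hmi hmj rfl
    simp only [Prod.mk.injEq] at this
    omega
  have hsub : (pvAssemble genera.length ((pvGroups genera).zip combo)) ⊆
      List.range genera.length := by
    intro x hx
    rcases List.mem_iff_getElem.mp hx with ⟨v, hvl, hxv⟩
    rcases pvAssemble_spec genera combo hF v (hlen ▸ hvl) with ⟨w, hwlt, -, -, hg⟩
    rw [List.getD_eq_getElem _ _ hvl, hxv] at hg
    rw [List.mem_range, hg]
    exact hwlt
  exact (hnd.subperm hsub).perm_of_length_le (by rw [List.length_range, hlen])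

theorem pvAssemble_genusOK (genera : List Int) (combo : List (List Nat))
    (hF : List.Forall₂ (fun c G => c.Perm G) combo (pvGroups genera)) :
    pvGenusOK genera genera.length (pvAssemble genera.length ((pvGroups genera).zip combo)) = true := by
  refine List.all_eq_true.mpr ?_
  intro v hv
  rcases pvAssemble_spec genera combo hF v (List.mem_range.mp hv) with ⟨w, -, hgw, -, hg⟩
  rw [hg]
  exact beq_iff_eq.mpr hgw

theorem pvCombo_recover (genera : List Int) (combo : List (List Nat))
    (hF : List.Forall₂ (fun c G => c.Perm G) combo (pvGroups genera)) :
    combo = (pvGroups genera).map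
      (fun G => G.map (fun v => (pvAssemble genera.length ((pvGroups genera).zip combo)).getD v 0)) := by
  refine List.ext_getElem (by rw [List.length_map]; exact hF.length_eq) ?_
  intro i h1 h2
  have h2' : i < (pvGroups genera).length := by rw [List.length_map] at h2; exact h2
  have hci : combo[i].Perm ((pvGroups genera)[i]) := hF.get h1 h2'
  rw [List.getElem_map]
  refine List.ext_getElem (by rw [List.length_map]; exact hci.length_eq) ?_
  intro j hj1 hj2
  have hj2' : j < ((pvGroups genera)[i]'h2').length := by rw [List.length_map] at hj2; exact hj2
  rw [List.getElem_map]
  refine (pvAssemble_getD genera combo hF _ _ ?_).symm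
  show _ ∈ ((pvGroups genera).zip combo).flatMap fun vm => vm.1.zip vm.2
  refine List.mem_flatMap.mpr ⟨((pvGroups genera)[i]'h2', combo[i]'h1), ?_, ?_⟩
  · have hiz : i < ((pvGroups genera).zip combo).length := by
      rw [List.length_zip]; omega
    refine List.mem_iff_getElem.mpr ⟨i, hiz, ?_⟩
    rw [List.getElem_zip]
  · have hjz : j < (((pvGroups genera)[i]'h2').zip (combo[i]'h1)).length := by
      rw [List.length_zip]; omega
    refine List.mem_iff_getElem.mpr ⟨j, hjz, ?_⟩
    rw [List.getElem_zip]

-- ---- membership and nodup of the generator's output ----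

theorem forall₂_of_mem_sections (Gs combo : List (List Nat))
    (h : combo ∈ (Gs.map List.permutations).sections) :
    List.Forall₂ (fun c G => c.Perm G) combo Gs := by
  have h2 := List.forall₂_map_right_iff.mp (List.mem_sections.mp h)
  exact h2.imp (fun _ _ hc => List.mem_permutations.mp hc)

theorem zip_map_self (Gs : List (List Nat)) (f : List Nat → List Nat) :
    Gs.zip (Gs.map f) = Gs.map (fun G => (G, f G)) := by
  have := List.zip_map' (f := (id : List Nat → List Nat)) (g := f) (l := Gs)
  simpa using this

theorem zip_map_self' (G : List Nat) (f : Nat → Nat) :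
    G.zip (G.map f) = G.map (fun v => (v, f v)) := by
  have := List.zip_map' (f := (id : Nat → Nat)) (g := f) (l := G)
  simpa using this

theorem mem_pvGPP (genera : List Int) (p : List Nat) :
    p ∈ pvGPP genera ↔
      p.Perm (List.range genera.length) ∧ pvGenusOK genera genera.length p = true := by
  rw [pvGPP_eq, List.mem_map]
  constructor
  · rintro ⟨combo, hsec, rfl⟩
    have hF := forall₂_of_mem_sections _ _ hsec
    exact ⟨pvAssemble_perm genera combo hF, pvAssemble_genusOK genera combo hF⟩
  · rintro ⟨hperm, hg⟩
    have hplen : p.length = genera.length := by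
      rw [hperm.length_eq, List.length_range]
    have hpnodup : p.Nodup := hperm.nodup_iff.mpr List.nodup_range
    have hFmem : ∀ G ∈ pvGroups genera, (G.map (fun v => p.getD v 0)).Perm G := by
      intro G hG
      rcases pvGroups_char genera G hG with ⟨g, hchar⟩
      have hGsub : ∀ v ∈ G, v < genera.length := fun v hv => ((hchar v).mp hv).1
      have hnd : (G.map (fun v => p.getD v 0)).Nodup := by
        refine List.Nodup.map_on ?_ (pvGroups_nodup genera G hG)
        intro u hu v hv huv
        have hul : u < p.length := hplen ▸ hGsub u hu
        have hvl : v < p.length := hplen ▸ hGsub v hv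
        rw [List.getD_eq_getElem _ _ hul, List.getD_eq_getElem _ _ hvl] at huv
        exact (hpnodup.getElem_inj_iff).mp huv
      have hsub : (G.map (fun v => p.getD v 0)) ⊆ G := by
        intro x hx
        rcases List.mem_map.mp hx with ⟨v, hvG, hxv⟩
        have hvn : v < genera.length := hGsub v hvG
        have hvl : v < p.length := hplen ▸ hvn
        have hxp : x ∈ p := by
          rw [← hxv, List.getD_eq_getElem _ _ hvl]
          exact List.getElem_mem hvl
        have hxn : x < genera.length := by
          have := hperm.subset hxp
          rwa [List.mem_range] at this
        have hgen : genera.getD x 0 = genera.getD v 0 := by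
          have := List.all_eq_true.mp hg v (List.mem_range.mpr hvn)
          rw [← hxv]
          exact beq_iff_eq.mp this
        refine (hchar x).mpr ⟨hxn, ?_⟩
        rw [hgen]
        exact ((hchar v).mp hvG).2
      exact (hnd.subperm hsub).perm_of_length_le (by rw [List.length_map])
    have hF : List.Forall₂ (fun c G => c.Perm G)
        ((pvGroups genera).map (fun G => G.map (fun v => p.getD v 0))) (pvGroups genera) := by
      rw [List.forall₂_map_left_iff, List.forall₂_same]
      exact fun G hG => hFmem G hG
    refine ⟨(pvGroups genera).map (fun G => G.map (fun v => p.getD v 0)), ?_, ?_⟩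
    · rw [List.mem_sections, List.forall₂_map_right_iff, List.forall₂_map_left_iff,
        List.forall₂_same]
      intro G hG
      rw [List.mem_permutations]
      exact hFmem G hG
    · refine (List.ext_getElem ?_ ?_).symm
      · rw [pvAssemble_length, hplen]
      · intro v hv1 hv2
        have hvn : v < genera.length := hplen ▸ hv1
        have hmem : (v, p.getD v 0) ∈
            pvUpd (pvGroups genera) ((pvGroups genera).map (fun G => G.map (fun v => p.getD v 0))) := by
          rcases List.mem_flatten.mp ((mem_flatten_pvGroups genera v).mpr hvn) with ⟨G, hG, hvG⟩
          show _ ∈ ((pvGroups genera).zip _).flatMap fun vm => vm.1.zip vm.2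
          rw [zip_map_self]
          refine List.mem_flatMap.mpr ⟨(G, G.map (fun v => p.getD v 0)), List.mem_map_of_mem hG, ?_⟩
          rw [zip_map_self']
          exact List.mem_map_of_mem hvG
        have := pvAssemble_getD genera _ hF v (p.getD v 0) hmem
        rw [List.getD_eq_getElem _ _ hv2, List.getD_eq_getElem _ _ hv1] at this
        exact this.symm

theorem nodup_sections (L : List (List (List Nat))) (h : ∀ l ∈ L, l.Nodup) :
    L.sections.Nodup := by
  induction L with
  | nil => simp
  | cons l L ih =>
    have hL := ih (fun l' hl' => h l' (List.mem_cons_of_mem _ hl'))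
    simp only [List.sections]
    rw [List.nodup_flatMap]
    refine ⟨?_, ?_⟩
    · intro s _
      refine List.Nodup.map_on ?_ (h l List.mem_cons_self)
      intro a _ b _ hab
      exact (List.cons.injEq _ _ _ _ ▸ hab).1
    · refine List.Pairwise.imp ?_ hL
      intro s t hst
      intro x hxs hxt
      rcases List.mem_map.mp hxs with ⟨a, -, ha⟩
      rcases List.mem_map.mp hxt with ⟨b, -, hb⟩
      rw [← ha] at hb
      exact hst ((List.cons.injEq _ _ _ _ ▸ hb).2).symm

theorem nodup_pvGPP (genera : List Int) : (pvGPP genera).Nodup := by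
  rw [pvGPP_eq]
  refine List.Nodup.map_on ?_ (nodup_sections _ ?_)
  · intro x hx y hy hxy
    have hFx := forall₂_of_mem_sections _ _ hx
    have hFy := forall₂_of_mem_sections _ _ hy
    rw [pvCombo_recover genera x hFx, hxy, ← pvCombo_recover genera y hFy]
  · intro l hl
    rcases List.mem_map.mp hl with ⟨G, hG, rfl⟩
    exact List.nodup_permutations G (pvGroups_nodup genera G hG)

-- ---- the inverse permutation ----

theorem pvInv_eq_setFold (numv : Nat) (perm : List Nat) :
    pvInv numv perm = pvSetFold perm.zipIdx (List.replicate numv 0) := rfl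

theorem pvInv_length (numv : Nat) (perm : List Nat) : (pvInv numv perm).length = numv := by
  rw [pvInv_eq_setFold, pvSetFold_length, List.length_replicate]

theorem pvInv_getD (n : Nat) (p : List Nat) (hp : p.Perm (List.range n)) (j : Nat) (hj : j < n) :
    (pvInv n p).getD (p.getD j 0) 0 = j := by
  have hplen : p.length = n := by rw [hp.length_eq, List.length_range]
  have hjl : j < p.length := hplen ▸ hj
  rw [pvInv_eq_setFold]
  refine pvSetFold_getD_mem _ _ _ _ ?_ ?_ ?_
  · rw [List.zipIdx_map_fst]
    exact hp.nodup_iff.mpr List.nodup_range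
  · refine List.mem_zipIdx_iff_getElem?.mpr ?_
    show p[j]? = some (p.getD j 0)
    rw [List.getD_eq_getElem _ _ hjl, List.getElem?_eq_getElem hjl]
  · rw [List.length_replicate, List.getD_eq_getElem _ _ hjl]
    have := hp.subset (List.getElem_mem hjl)
    rwa [List.mem_range] at this

theorem pvInv_cover (n : Nat) (p : List Nat) (hp : p.Perm (List.range n)) (w : Nat) (hw : w < n) :
    ∃ j, j < n ∧ p.getD j 0 = w ∧ (pvInv n p).getD w 0 = j := by
  have hplen : p.length = n := by rw [hp.length_eq, List.length_range]
  have hwp : w ∈ p := hp.mem_iff.mpr (List.mem_range.mpr hw)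
  rcases List.mem_iff_getElem.mp hwp with ⟨j, hjl, hpj⟩
  have hjn : j < n := hplen ▸ hjl
  have hgd : p.getD j 0 = w := by rw [List.getD_eq_getElem _ _ hjl, hpj]
  exact ⟨j, hjn, hgd, hgd ▸ pvInv_getD n p hp j hjn⟩

theorem pvInv_perm (n : Nat) (p : List Nat) (hp : p.Perm (List.range n)) :
    (pvInv n p).Perm (List.range n) := by
  have hlen := pvInv_length n p
  have hnd : (pvInv n p).Nodup := by
    show List.Pairwise _ _
    refine List.pairwise_iff_getElem.mpr ?_
    intro w w' hw hw' hww heq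
    rcases pvInv_cover n p hp w (hlen ▸ hw) with ⟨j, -, hpj, hj⟩
    rcases pvInv_cover n p hp w' (hlen ▸ hw') with ⟨j', -, hpj', hj'⟩
    rw [List.getD_eq_getElem _ _ hw] at hj
    rw [List.getD_eq_getElem _ _ hw'] at hj'
    have : j = j' := by rw [← hj, ← hj', heq]
    subst this
    exact absurd (hpj.symm.trans hpj') (by omega)
  have hsub : pvInv n p ⊆ List.range n := by
    intro x hx
    rcases List.mem_iff_getElem.mp hx with ⟨w, hwl, hxw⟩
    rcases pvInv_cover n p hp w (hlen ▸ hwl) with ⟨j, hjn, -, hj⟩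
    rw [List.getD_eq_getElem _ _ hwl, hxw] at hj
    rw [List.mem_range, hj]
    exact hjn
  exact (hnd.subperm hsub).perm_of_length_le (by rw [List.length_range, hlen])

theorem pvInv_genusOK (genera : List Int) (n : Nat) (p : List Nat)
    (hp : p.Perm (List.range n)) (hg : pvGenusOK genera n p = true) :
    pvGenusOK genera n (pvInv n p) = true := by
  refine List.all_eq_true.mpr ?_
  intro w hw
  rcases pvInv_cover n p hp w (List.mem_range.mp hw) with ⟨j, hjn, hpj, hj⟩
  have := List.all_eq_true.mp hg j (List.mem_range.mpr hjn)
  rw [hpj] at this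
  rw [hj]
  exact beq_iff_eq.mpr (beq_iff_eq.mp this).symm

theorem pvInv_pvInv (n : Nat) (p : List Nat) (hp : p.Perm (List.range n)) :
    pvInv n (pvInv n p) = p := by
  have hplen : p.length = n := by rw [hp.length_eq, List.length_range]
  have hq := pvInv_perm n p hp
  have hqlen := pvInv_length n p
  refine List.ext_getElem (by rw [pvInv_length, hplen]) ?_
  intro v hv1 hv2
  have hvn : v < n := hplen ▸ hv2
  have hpv : p.getD v 0 < n := by
    rw [List.getD_eq_getElem _ _ hv2]
    have := hp.subset (List.getElem_mem hv2)
    rwa [List.mem_range] at this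
  have hmem : (v, p.getD v 0) ∈ (pvInv n p).zipIdx := by
    refine List.mem_zipIdx_iff_getElem?.mpr ?_
    show (pvInv n p)[p.getD v 0]? = some v
    have hlt : p.getD v 0 < (pvInv n p).length := by rw [pvInv_length]; exact hpv
    rw [List.getElem?_eq_getElem hlt, ← List.getD_eq_getElem _ 0 hlt]
    exact congrArg some (pvInv_getD n p hp v hvn)
  have : (pvInv n (pvInv n p)).getD v 0 = p.getD v 0 := by
    rw [pvInv_eq_setFold]
    refine pvSetFold_getD_mem _ _ _ _ ?_ hmem ?_
    · rw [List.zipIdx_map_fst]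
      exact hq.nodup_iff.mpr List.nodup_range
    · rw [List.length_replicate]
      exact hvn
  rwa [List.getD_eq_getElem _ _ hv1, List.getD_eq_getElem _ _ hv2] at this

-- ---- the bijection: inverses of the generated perms = all genus-preserving perms ----

theorem pvGPP_map_inv_perm (genera : List Int) :
    ((pvGPP genera).map (pvInv genera.length)).Perm
      (((List.range genera.length).permutations).filter
        (fun q => pvGenusOK genera genera.length q)) := by
  have hndL : ((pvGPP genera).map (pvInv genera.length)).Nodup := by
    refine List.Nodup.map_on ?_ (nodup_pvGPP genera)
    intro x hx y hy hxy
    have hxp := (mem_pvGPP genera x).mp hx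
    have hyp := (mem_pvGPP genera y).mp hy
    rw [← pvInv_pvInv _ x hxp.1, hxy, pvInv_pvInv _ y hyp.1]
  have hndR : ((((List.range genera.length).permutations)).filter
      (fun q => pvGenusOK genera genera.length q)).Nodup :=
    (List.nodup_permutations _ List.nodup_range).filter _
  refine (List.perm_ext_iff_of_nodup hndL hndR).mpr ?_
  intro q
  rw [List.mem_filter, List.mem_permutations, List.mem_map]
  constructor
  · rintro ⟨p, hp, rfl⟩
    rcases (mem_pvGPP genera p).mp hp with ⟨hperm, hg⟩
    exact ⟨pvInv_perm _ p hperm, pvInv_genusOK genera _ p hperm hg⟩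
  · rintro ⟨hqperm, hqg⟩
    refine ⟨pvInv genera.length q, ?_, pvInv_pvInv _ q hqperm⟩
    exact (mem_pvGPP genera _).mpr
      ⟨pvInv_perm _ q hqperm, pvInv_genusOK genera _ q hqperm hqg⟩

-- ---- counting ----

theorem foldl_if_count (l : List (List Nat)) (f : List Nat → Bool) (E c : Int) :
    l.foldl (fun c x => if f x then c + E else c) c = c + (l.countP f : Int) * E := by
  induction l generalizing c with
  | nil => simp
  | cons x rest ih =>
    rw [List.foldl_cons, List.countP_cons]
    by_cases h : f x
    · rw [if_pos h, ih]
      simp only [h, if_true]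
      push_cast
      ring
    · rw [if_neg h, ih]
      simp [h]

theorem foldl_mul (l : List Nat) (f : Nat → Int) (a : Int) :
    l.foldl (fun e x => e * f x) a = a * (l.map f).prod := by
  induction l generalizing a with
  | nil => simp
  | cons x rest ih => simp [ih, mul_assoc]

theorem foldl_mul_nested (l : List Nat) (g : Nat → List Nat) (f : Nat → Nat → Int) (a : Int) :
    l.foldl (fun e i => (g i).foldl (fun e j => e * f i j) e) a
      = a * (l.map (fun i => ((g i).map (f i)).prod)).prod := by
  induction l generalizing a with
  | nil => simp
  | cons x rest ih =>
    rw [List.foldl_cons, ih, foldl_mul, List.map_cons, List.prod_cons, mul_assoc]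

theorem foldl_mul_nested' (l : List Nat) (g : Nat → List Nat) (f : Nat → Nat → Int)
    (d : Nat → Int) (a : Int) :
    l.foldl (fun e i => (g i).foldl (fun e j => e * f i j) (e * d i)) a
      = a * (l.map (fun i => d i * ((g i).map (f i)).prod)).prod := by
  induction l generalizing a with
  | nil => simp
  | cons x rest ih =>
    rw [List.foldl_cons, ih, foldl_mul, List.map_cons, List.prod_cons]
    ring

theorem pvEdgeFactor_eq (adj : List (List Int)) (n : Nat) :
    pvEdgeFactor adj n = (List.range n).foldl
      (fun e i => (List.range' (i+1) (n - (i+1))).foldl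
        (fun e j => e * pvFact (pvAdjAt adj i j))
        (e * (pvFact (pvAdjAt adj i i) * 2 ^ (pvAdjAt adj i i).toNat))) 1 := by
  rw [pvEdgeFactor]
  rw [foldl_mul (List.range n) (fun i => pvFact (pvAdjAt adj i i) * 2 ^ (pvAdjAt adj i i).toNat) 1]
  rw [foldl_mul_nested (List.range n) (fun i => List.range' (i+1) (n - (i+1)))
    (fun i j => pvFact (pvAdjAt adj i j))]
  rw [foldl_mul_nested' (List.range n) (fun i => List.range' (i+1) (n - (i+1)))
    (fun i j => pvFact (pvAdjAt adj i j))
    (fun i => pvFact (pvAdjAt adj i i) * 2 ^ (pvAdjAt adj i i).toNat) 1]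
  simp only [List.prod_map_mul]
  ring

-- ===== VERDICT (by name: the statement is the Claim_ definition above) =====
theorem automorphism_order_py_A_eq (adj : List (List Int)) (genera : List Int) :
    automorphism_order_py adj genera = (pvGPP genera).foldl
      (fun count perm =>
        if pvTriangle adj adj.length (pvInv adj.length perm) then
          count + pvEdgeFactor adj adj.length else count) 0 := rfl

theorem automorphism_order_py_alt_eq (adj : List (List Int)) (genera : List Int) :
    automorphism_order_py_alt adj genera =
      (((List.range adj.length).permutations.countP
        (fun q => pvGenusOK genera adj.length q && pvTriangle adj adj.length q) : Int)) *
      ((List.range adj.length).foldl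
        (fun e i => (List.range' (i+1) (adj.length - (i+1))).foldl
          (fun e j => e * pvFact (pvAdjAt adj i j))
          (e * (pvFact (pvAdjAt adj i i) * 2 ^ (pvAdjAt adj i i).toNat))) 1) := rfl

theorem automorphism_order_py_spec : Claim_equal_automorphism_order_py := by
  intro adj genera _hdom hpre
  unfold Spec_automorphism_order_py
  obtain ⟨hlen, -, -⟩ := hpre
  rw [automorphism_order_py_A_eq, automorphism_order_py_alt_eq, ← hlen,
    foldl_if_count, ← pvEdgeFactor_eq, zero_add]
  have hc1 : (pvGPP genera).countP
      (fun perm => pvTriangle adj genera.length (pvInv genera.length perm))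
    = ((pvGPP genera).map (pvInv genera.length)).countP
        (fun q => pvTriangle adj genera.length q) := by
    rw [List.countP_map]
    rfl
  rw [hc1, (pvGPP_map_inv_perm genera).countP_eq, List.countP_filter]
  have hc2 : ((List.range genera.length).permutations).countP
      (fun a => pvTriangle adj genera.length a && pvGenusOK genera genera.length a)
    = ((List.range genera.length).permutations).countP
      (fun q => pvGenusOK genera genera.length q && pvTriangle adj genera.length q) := by
    refine List.countP_congr ?_
    intro a _
    rw [Bool.and_comm]
  rw [hc2]
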